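-- pv_equiv track=rewrite | github.com/anniebryan/advent-of-code-19 | 2018/day2/solution.py | part_1
-- ===== SOURCE A (Python) =====
-- import string
--
-- def part_1(puzzle_input):
--     num_2 = 0
--     num_3 = 0
--     for box in puzzle_input:
--         counts = []
--         for letter in string.ascii_lowercase:
--             count = box.count(letter)
--             counts.append(count)
--         if 2 in counts:
--             num_2 += 1
--         if 3 in counts:
--             num_3 += 1
--     return num_2*num_3
-- ===== SOURCE B (Python) =====
-- import string
--
-- def part_1(puzzle_input):
--     num_2 = 0
--     num_3 = 0
--     for box in puzzle_input:
--         letters = sorted(ch for ch in box if ch in string.ascii_lowercase)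
--         has2 = False
--         has3 = False
--         prev = None
--         run = 0
--         for ch in letters:
--             if ch == prev:
--                 run += 1
--             else:
--                 if run == 2:
--                     has2 = True
--                 if run == 3:
--                     has3 = True
--                 prev = ch
--                 run = 1
--         if run == 2:
--             has2 = True
--         if run == 3:
--             has3 = True
--         if has2:
--             num_2 += 1
--         if has3:
--             num_3 += 1
--     return num_2 * num_3
-- ===== Notes on version B (the rewrite author's own statement) =====
-- stated objective: faster
-- what changed: Per box, B sorts the box's lowercase letters and scans the consecutive runs of the sorted list (groupby-style run-length pass with has2/has3 flags), instead of A's 26 separate box.count(letter) scans over the whole string.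
import Mathlib
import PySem

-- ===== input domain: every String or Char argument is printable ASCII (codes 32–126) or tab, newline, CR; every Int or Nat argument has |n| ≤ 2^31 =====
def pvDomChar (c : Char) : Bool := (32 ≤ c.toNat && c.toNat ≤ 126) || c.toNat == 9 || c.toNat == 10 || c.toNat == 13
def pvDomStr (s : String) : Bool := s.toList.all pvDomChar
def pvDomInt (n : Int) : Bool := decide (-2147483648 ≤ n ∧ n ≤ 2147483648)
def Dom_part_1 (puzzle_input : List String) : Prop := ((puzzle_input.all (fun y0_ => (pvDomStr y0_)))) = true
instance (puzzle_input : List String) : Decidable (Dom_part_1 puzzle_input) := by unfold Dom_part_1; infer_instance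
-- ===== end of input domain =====

-- ===== PORT A =====
-- B sorts each box's lowercase letters and scans consecutive runs instead of 26 box.count(letter) scans (objective: faster, measured).
def pvAsciiLowercase : List Char := "abcdefghijklmnopqrstuvwxyz".toList

-- loop body of A: counts = [box.count(letter) for letter in ascii_lowercase]; then the two membership tests
def pvStepA (st : Int × Int) (box : String) : Int × Int :=
  let counts : List Int := pvAsciiLowercase.foldl
    (fun acc letter => acc ++ [(PySem.Str.count box (String.ofList [letter]) : Int)]) []
  let st2 := if (2 : Int) ∈ counts then (st.1 + 1, st.2) else st
  if (3 : Int) ∈ counts then (st2.1, st2.2 + 1) else st2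

def part_1 (puzzle_input : List String) : Int :=
  let r := puzzle_input.foldl pvStepA (0, 0)
  r.1 * r.2

-- ===== PORT B =====
-- inner loop of B: run-length scan over the sorted letters, state (prev, run, has2, has3)
def pvStepRun (st : Option Char × Nat × Bool × Bool) (ch : Char) : Option Char × Nat × Bool × Bool :=
  if some ch == st.1 then (st.1, st.2.1 + 1, st.2.2.1, st.2.2.2)
  else (some ch, 1, st.2.2.1 || (st.2.1 == 2), st.2.2.2 || (st.2.1 == 3))

-- loop body of B: letters = sorted(ch for ch in box if ch in ascii_lowercase); run scan; final run flush
def pvStepB (st : Int × Int) (box : String) : Int × Int :=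
  let letters := PySem.List.sorted (box.toList.filter (fun ch => decide (ch ∈ pvAsciiLowercase))) (fun x => x) false
  let r := letters.foldl pvStepRun (none, 0, false, false)
  let h2 := r.2.2.1 || (r.2.1 == 2)
  let h3 := r.2.2.2 || (r.2.1 == 3)
  let st2 := if h2 then (st.1 + 1, st.2) else st
  if h3 then (st2.1, st2.2 + 1) else st2

def part_1_alt (puzzle_input : List String) : Int :=
  let r := puzzle_input.foldl pvStepB (0, 0)
  r.1 * r.2

-- ===== PRECONDITION & SPEC =====
def Spec_part_1 (puzzle_input : List String) (out : Int) : Prop := out = part_1_alt puzzle_input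
instance (puzzle_input : List String) (out : Int) : Decidable (Spec_part_1 puzzle_input out) := by unfold Spec_part_1; infer_instance

-- ===== CLAIM (what is proved, stated in full; the proofs are below) =====
def Claim_equal_part_1 : Prop := ∀ (puzzle_input : List String), Dom_part_1 puzzle_input → Spec_part_1 puzzle_input (part_1 puzzle_input)

-- ===== LEMMAS AND PROOFS =====

-- str.count with a single-character needle is the character count
lemma count_go_single (c : Char) : ∀ (fuel : Nat) (s : List Char) (acc : Nat),
    s.length ≤ fuel → PySem.Chars.count.go [c] fuel s acc = acc + s.count c := by
  intro fuel
  induction fuel with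
  | zero =>
    intro s acc h
    interval_cases hs : s.length
    · simp [List.length_eq_zero_iff.mp hs, PySem.Chars.count.go]
  | succ n ih =>
    intro s acc h
    cases s with
    | nil => simp [PySem.Chars.count.go]
    | cons hd t =>
      simp only [PySem.Chars.count.go]
      by_cases hc : c = hd
      · subst hc
        simp only [List.isPrefixOf, beq_self_eq_true, List.length_singleton,
          List.drop_succ_cons, List.drop_zero]
        rw [if_pos (by simp), ih t (acc + 1) (by simpa using h)]
        simp
        omega
      · rw [show ([c].isPrefixOf (hd :: t)) = false by simp [List.isPrefixOf, hc]]
        simp only [if_false, Bool.false_eq_true]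
        rw [ih t acc (by simpa using h)]
        simp only [List.count_cons]
        have : ¬ hd = c := fun h' => hc h'.symm
        simp [this]

lemma chars_count_single (s : List Char) (c : Char) :
    PySem.Chars.count s [c] = s.count c := by
  simp only [PySem.Chars.count, List.isEmpty_cons, if_false, Bool.false_eq_true]
  simpa using count_go_single c s.length s 0 le_rfl

-- the run flag B's scan computes, as a recursion on the (sorted) letter list
def pvRunFlag (K : Nat) : Option Char → Nat → List Char → Bool
  | _, run, [] => run == K
  | prev, run, c :: t =>
    if some c == prev then pvRunFlag K prev (run + 1) t
    else (run == K) || pvRunFlag K (some c) 1 t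

-- the fold's has2 flag (plus final flush) is pvRunFlag 2
lemma fold_flag2 : ∀ (s : List Char) (prev : Option Char) (run : Nat) (h2 h3 : Bool),
    ((s.foldl pvStepRun (prev, run, h2, h3)).2.2.1 || ((s.foldl pvStepRun (prev, run, h2, h3)).2.1 == 2))
      = (h2 || pvRunFlag 2 prev run s) := by
  intro s
  induction s with
  | nil => intro prev run h2 h3; simp [pvRunFlag]
  | cons c t ih =>
    intro prev run h2 h3
    simp only [List.foldl_cons, pvStepRun, pvRunFlag]
    by_cases hc : (some c == prev) = true
    · simp only [hc, if_pos]
      exact ih prev (run + 1) h2 h3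
    · simp only [hc, Bool.false_eq_true, if_false]
      rw [ih (some c) 1 (h2 || (run == 2)) (h3 || (run == 3))]
      simp [Bool.or_assoc]

-- the fold's has3 flag (plus final flush) is pvRunFlag 3
lemma fold_flag3 : ∀ (s : List Char) (prev : Option Char) (run : Nat) (h2 h3 : Bool),
    ((s.foldl pvStepRun (prev, run, h2, h3)).2.2.2 || ((s.foldl pvStepRun (prev, run, h2, h3)).2.1 == 3))
      = (h3 || pvRunFlag 3 prev run s) := by
  intro s
  induction s with
  | nil => intro prev run h2 h3; simp [pvRunFlag]
  | cons c t ih =>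
    intro prev run h2 h3
    simp only [List.foldl_cons, pvStepRun, pvRunFlag]
    by_cases hc : (some c == prev) = true
    · simp only [hc, if_pos]
      exact ih prev (run + 1) h2 h3
    · simp only [hc, Bool.false_eq_true, if_false]
      rw [ih (some c) 1 (h2 || (run == 2)) (h3 || (run == 3))]
      simp [Bool.or_assoc]

-- count of the optional previous character
def pvMCount : Option Char → List Char → Nat
  | none, _ => 0
  | some c, s => s.count c

-- on a sorted suffix whose elements all dominate prev, the run flag says:
-- "the current run (continued into s) has length K, or some later letter has count K"
lemma runFlag_spec (K : Nat) : ∀ (s : List Char) (prev : Option Char) (run : Nat),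
    s.Pairwise (· ≤ ·) → (∀ x ∈ s, ∀ p, prev = some p → p ≤ x) →
    (pvRunFlag K prev run s = true ↔
      (run + pvMCount prev s = K ∨ ∃ c ∈ s, some c ≠ prev ∧ s.count c = K)) := by
  intro s
  induction s with
  | nil =>
    intro prev run _ _
    cases prev <;> simp [pvRunFlag, pvMCount]
  | cons c t ih =>
    intro prev run hsort hlb
    have hct : ∀ x ∈ t, c ≤ x := fun x hx => (List.pairwise_cons.mp hsort).1 x hx
    have htsort : t.Pairwise (· ≤ ·) := (List.pairwise_cons.mp hsort).2
    simp only [pvRunFlag]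
    by_cases hc : (some c == prev) = true
    · have hprev : prev = some c := (eq_of_beq hc).symm
      subst hprev
      rw [if_pos hc]
      rw [ih (some c) (run + 1) htsort (fun x hx p hp => by
        cases hp; exact hct x hx)]
      constructor
      · rintro (h1 | ⟨c', hc', hne, hcnt⟩)
        · left
          simp only [pvMCount, List.count_cons_self] at *
          omega
        · right
          refine ⟨c', List.mem_cons_of_mem c hc', hne, ?_⟩
          have hcc : c' ≠ c := fun h => hne (by rw [h])
          simp [Ne.symm hcc, hcnt]
      · rintro (h1 | ⟨c', hc', hne, hcnt⟩)
        · left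
          simp only [pvMCount, List.count_cons_self] at h1 ⊢
          omega
        · right
          have hcc : c' ≠ c := fun h => hne (by rw [h])
          have hmem : c' ∈ t := by
            rcases List.mem_cons.mp hc' with h | h
            · exact absurd h hcc
            · exact h
          exact ⟨c', hmem, hne, by simpa [Ne.symm hcc] using hcnt⟩
    · rw [if_neg (by simpa using hc)]
      have hne : some c ≠ prev := by
        intro h
        apply hc
        simp [h]
      have hprev_not : pvMCount prev (c :: t) = 0 := by
        cases prev with
        | none => rfl
        | some p =>
          have hpc : p ≤ c := hlb c (List.mem_cons_self) p rfl
          have hpc' : p ≠ c := fun h => hne (by rw [h])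
          have hplt : p < c := lt_of_le_of_ne hpc hpc'
          simp only [pvMCount]
          apply List.count_eq_zero.mpr
          intro hmem
          rcases List.mem_cons.mp hmem with h | h
          · exact absurd h hpc'
          · exact absurd (lt_of_lt_of_le hplt (hct p h)) (lt_irrefl p)
      rw [hprev_not]
      simp only [Bool.or_eq_true, beq_iff_eq]
      rw [ih (some c) 1 htsort (fun x hx p hp => by cases hp; exact hct x hx)]
      constructor
      · rintro (h1 | h2 | ⟨c', hc', hne', hcnt⟩)
        · left; omega
        · right
          refine ⟨c, List.mem_cons_self, hne, ?_⟩
          simp only [pvMCount] at h2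
          simp only [List.count_cons_self]
          omega
        · right
          have hcc : c' ≠ c := fun h => hne' (by rw [h])
          refine ⟨c', List.mem_cons_of_mem c hc', ?_, ?_⟩
          · intro h
            rcases prev with _ | p
            · simp at h
            · have hpc : p < c := by
                have hle : p ≤ c := hlb c (List.mem_cons_self) p rfl
                exact lt_of_le_of_ne hle (fun hh => hne (by rw [hh]))
              have : c' = p := Option.some.inj h
              have : p ∈ t := this ▸ hc'
              exact absurd (lt_of_lt_of_le hpc (hct p this)) (lt_irrefl p)
          · simp [Ne.symm hcc, hcnt]
      · rintro (h1 | ⟨c', hc', hne', hcnt⟩)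
        · left; omega
        · rcases List.mem_cons.mp hc' with h | h
          · subst h
            right; left
            simp only [pvMCount, List.count_cons_self] at hcnt ⊢
            omega
          · by_cases hcc : c' = c
            · subst hcc
              right; left
              simp only [pvMCount, List.count_cons_self] at hcnt ⊢
              omega
            · right; right
              have hcc' : c ≠ c' := fun hh => hcc hh.symm
              refine ⟨c', h, fun hh => hcc (Option.some.inj hh), ?_⟩
              simpa [List.count_cons, hcc'] using hcnt

-- on the sorted filtered letters, the run flag for K ≠ 0 says "some lowercase letter occurs K times in box"
lemma bridge_count (box : List Char) (K : Nat) (hK : K ≠ 0) :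
    (pvRunFlag K none 0
        (PySem.List.sorted (box.filter (fun ch => decide (ch ∈ pvAsciiLowercase))) (fun x => x) false) = true)
      ↔ ∃ l ∈ pvAsciiLowercase, box.count l = K := by
  set f := box.filter (fun ch => decide (ch ∈ pvAsciiLowercase)) with hf
  set s := PySem.List.sorted f (fun x => x) false with hs
  have hsort : s.Pairwise (· ≤ ·) := PySem.List.sorted_pairwise f (fun x => x)
  have hperm : s.Perm f := PySem.List.sorted_perm f (fun x => x) false
  rw [runFlag_spec K s none 0 hsort (fun x _ p hp => nomatch hp)]
  simp only [pvMCount, Nat.zero_add]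
  constructor
  · rintro (h | ⟨c, hc, _, hcnt⟩)
    · omega
    · have hcf : c ∈ f := hperm.mem_iff.mp hc
      have hclow : c ∈ pvAsciiLowercase := by
        have := List.of_mem_filter hcf
        exact of_decide_eq_true this
      refine ⟨c, hclow, ?_⟩
      have h1 : s.count c = f.count c := hperm.count c
      have h2 : f.count c = box.count c := List.count_filter (by simpa using hclow)
      omega
  · rintro ⟨l, hl, hcnt⟩
    right
    have h2 : f.count l = box.count l := List.count_filter (by simpa using hl)
    have h1 : s.count l = f.count l := hperm.count l
    have hmemf : l ∈ f := by
      apply List.count_pos_iff.mp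
      omega
    exact ⟨l, hperm.mem_iff.mpr hmemf, Option.some_ne_none l, by omega⟩

lemma flag2_iff (box : List Char) :
    ((((PySem.List.sorted (box.filter (fun ch => decide (ch ∈ pvAsciiLowercase))) (fun x => x) false).foldl
        pvStepRun (none, 0, false, false)).2.2.1
      || (((PySem.List.sorted (box.filter (fun ch => decide (ch ∈ pvAsciiLowercase))) (fun x => x) false).foldl
        pvStepRun (none, 0, false, false)).2.1 == 2)) = true)
      ↔ ∃ l ∈ pvAsciiLowercase, box.count l = 2 := by
  rw [fold_flag2]
  simpa using bridge_count box 2 (by omega)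

lemma flag3_iff (box : List Char) :
    ((((PySem.List.sorted (box.filter (fun ch => decide (ch ∈ pvAsciiLowercase))) (fun x => x) false).foldl
        pvStepRun (none, 0, false, false)).2.2.2
      || (((PySem.List.sorted (box.filter (fun ch => decide (ch ∈ pvAsciiLowercase))) (fun x => x) false).foldl
        pvStepRun (none, 0, false, false)).2.1 == 3)) = true)
      ↔ ∃ l ∈ pvAsciiLowercase, box.count l = 3 := by
  rw [fold_flag3]
  simpa using bridge_count box 3 (by omega)

lemma memA_iff (box : String) (K : Nat) :
    (((K : Int) ∈ pvAsciiLowercase.map (fun l => (PySem.Str.count box (String.ofList [l]) : Int)))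
      ↔ ∃ l ∈ pvAsciiLowercase, box.toList.count l = K) := by
  have hcnt : ∀ l, PySem.Str.count box (String.ofList [l]) = box.toList.count l := by
    intro l
    rw [PySem.Str.count_eq]
    simpa using chars_count_single box.toList l
  simp only [List.mem_map, hcnt]
  constructor
  · rintro ⟨l, hl, heq⟩
    exact ⟨l, hl, by exact_mod_cast heq⟩
  · rintro ⟨l, hl, heq⟩
    exact ⟨l, hl, by exact_mod_cast heq⟩

lemma box_step (st : Int × Int) (box : String) : pvStepA st box = pvStepB st box := by
  unfold pvStepA pvStepB
  simp only [PySem.List.foldl_append_singleton_eq_map, List.nil_append]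
  have c2 := (flag2_iff box.toList).trans (memA_iff box 2).symm
  have c3 := (flag3_iff box.toList).trans (memA_iff box 3).symm
  simp only [c2, c3, Nat.cast_ofNat]

-- ===== VERDICT (by name: the statement is the Claim_ definition above) =====
theorem part_1_spec : Claim_equal_part_1 := by
  intro puzzle_input _
  unfold Spec_part_1 part_1 part_1_alt
  have : ∀ (l : List String) (st : Int × Int), l.foldl pvStepA st = l.foldl pvStepB st := by
    intro l
    induction l with
    | nil => intro st; simp only [List.foldl_nil]
    | cons b t ih =>
      intro st
      simp only [List.foldl_cons, box_step, ih]
  rw [this]
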